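-- pv_equiv track=rewrite | github.com/pap-llp/decal-optimizer-backend | optimizer_api.py | generate_addition_candidates
-- ===== SOURCE A (Python) =====
-- from typing import List, Dict, Any
-- import itertools
--
-- def generate_addition_candidates(widths: List[int],
--                                  max_extra_per_width: int = 2,
--                                  max_total_extra: int = 6):
--     """
--     Generate maps like {210:1}, {210:2}, {210:1, 174:1}, ...
--     but keep total added rolls <= max_total_extra
--     """
--     # per-width choices: 0..max_extra_per_width
--     choices_per_width = [[i for i in range(max_extra_per_width + 1)] for _ in widths]
--     for tuple_counts in itertools.product(*choices_per_width):
--         total_added = sum(tuple_counts)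
--         if 0 < total_added <= max_total_extra:
--             add_map = {}
--             for w, c in zip(widths, tuple_counts):
--                 if c > 0:
--                     add_map[w] = c
--             yield add_map
-- ===== SOURCE B (Python) =====
-- def generate_addition_candidates(widths, max_extra_per_width=2, max_total_extra=6):
--     """DFS over widths with remaining-budget pruning: explores only count
--     prefixes that can still fit in max_total_extra, yielding the same maps
--     in the same order as exhaustive product enumeration."""
--     n = len(widths)
--
--     def dfs(i, budget, acc):
--         if i == n:
--             if budget < max_total_extra:  # something was added
--                 yield dict(acc)
--             return
--         w = widths[i]
--         cap = min(max_extra_per_width, budget)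
--         c = 0
--         while c <= cap:
--             if c == 0:
--                 yield from dfs(i + 1, budget, acc)
--             else:
--                 yield from dfs(i + 1, budget - c, acc + [(w, c)])
--             c += 1
--
--     yield from dfs(0, max_total_extra, [])
-- ===== Notes on version B (the rewrite author's own statement) =====
-- stated objective: alternative
-- what changed: Replaced the exhaustive itertools.product enumeration over all (max_extra_per_width+1)^n count tuples (filtered by total afterwards) with a recursive DFS over the widths that caps each count by the remaining budget, so only tuples whose total fits max_total_extra are ever generated, in the same order; intended as faster (avoids the (k+1)^n blow-up when the budget is small), but a timing run could not confirm it at the largest sizes.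
import Mathlib
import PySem

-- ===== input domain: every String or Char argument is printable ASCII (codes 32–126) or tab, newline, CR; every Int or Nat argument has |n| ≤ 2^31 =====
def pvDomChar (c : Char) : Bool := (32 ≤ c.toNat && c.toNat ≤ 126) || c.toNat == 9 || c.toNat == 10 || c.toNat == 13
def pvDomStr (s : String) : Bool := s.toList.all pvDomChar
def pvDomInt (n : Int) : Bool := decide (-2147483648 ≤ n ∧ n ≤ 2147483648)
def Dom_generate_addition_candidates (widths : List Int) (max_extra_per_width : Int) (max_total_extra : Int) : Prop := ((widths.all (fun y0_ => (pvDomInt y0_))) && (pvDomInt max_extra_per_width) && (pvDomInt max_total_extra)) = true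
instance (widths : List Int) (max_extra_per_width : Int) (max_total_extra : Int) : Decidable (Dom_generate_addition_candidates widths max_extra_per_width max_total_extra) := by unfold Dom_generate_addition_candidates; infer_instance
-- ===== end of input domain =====

-- B replaces A's exhaustive itertools.product enumeration by a DFS over the widths with
-- remaining-budget pruning, yielding the same maps in the same order (objective: alternative;
-- it skips count tuples whose total exceeds the budget instead of filtering them afterwards).

-- ===== PORT A =====
-- itertools.product(*lists), in Python's order (last coordinate varies fastest)
def pvProduct : List (List Int) → List (List Int)
  | [] => [[]]
  | l :: ls => l.flatMap (fun x => (pvProduct ls).map (fun t => x :: t))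

-- the add_map-building inner loop of A (dict represented as its items list)
def pvAddMap (widths counts : List Int) : List (Int × Int) :=
  ((widths.zip counts).foldl
    (fun d (p : Int × Int) => if 0 < p.2 then d.insert p.1 p.2 else d)
    PySem.Dict.empty).items

def generate_addition_candidates (widths : List Int) (max_extra_per_width : Int) (max_total_extra : Int) : List (List (Int × Int)) :=
  let choices_per_width := widths.map (fun _ => PySem.List.pyRange 0 (max_extra_per_width + 1) 1)
  (pvProduct choices_per_width).foldl
    (fun out tuple_counts =>
      if 0 < tuple_counts.sum ∧ tuple_counts.sum ≤ max_total_extra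
      then out ++ [pvAddMap widths tuple_counts] else out)
    []

-- ===== PORT B =====
-- dfs(i, budget, acc) of Source B: recursion over the remaining widths, counts capped by the
-- remaining budget; at the leaf, dict(acc) as its items list
def pvDfs (per tot : Int) : List Int → Int → List (Int × Int) → List (List (Int × Int))
  | [], budget, acc => if budget < tot then [(PySem.Dict.ofList acc).items] else []
  | w :: ws, budget, acc =>
    (PySem.List.pyRange 0 (min per budget + 1) 1).flatMap
      (fun c => if c = 0 then pvDfs per tot ws budget acc
                else pvDfs per tot ws (budget - c) (acc ++ [(w, c)]))

def generate_addition_candidates_alt (widths : List Int) (max_extra_per_width : Int) (max_total_extra : Int) : List (List (Int × Int)) :=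
  pvDfs max_extra_per_width max_total_extra widths max_total_extra []

-- ===== PRECONDITION & SPEC =====
def Spec_generate_addition_candidates (widths : List Int) (max_extra_per_width : Int) (max_total_extra : Int) (out : List (List (Int × Int))) : Prop := out = generate_addition_candidates_alt widths max_extra_per_width max_total_extra
instance (widths : List Int) (max_extra_per_width : Int) (max_total_extra : Int) (out : List (List (Int × Int))) : Decidable (Spec_generate_addition_candidates widths max_extra_per_width max_total_extra out) := by unfold Spec_generate_addition_candidates; infer_instance

-- ===== CLAIM (what is proved, stated in full; the proofs are below) =====
def Claim_equal_generate_addition_candidates : Prop := ∀ (widths : List Int) (max_extra_per_width : Int) (max_total_extra : Int), Dom_generate_addition_candidates widths max_extra_per_width max_total_extra → Spec_generate_addition_candidates widths max_extra_per_width max_total_extra (generate_addition_candidates widths max_extra_per_width max_total_extra)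

-- ===== LEMMAS AND PROOFS =====

-- common form both programs are reduced to: the filtered, mapped product with a budget
def pvSpec (per tot : Int) (ws : List Int) (budget : Int) (acc : List (Int × Int)) : List (List (Int × Int)) :=
  ((pvProduct (ws.map (fun _ => PySem.List.pyRange 0 (per + 1) 1))).filter
    (fun t => decide (t.sum ≤ budget ∧ budget - t.sum < tot))).map
    (fun t => (PySem.Dict.ofList (acc ++ (ws.zip t).filter (fun p => decide (0 < p.2)))).items)

theorem pvProduct_sum_nonneg (per : Int) :
    ∀ (ws : List Int) (t : List Int),
      t ∈ pvProduct (ws.map (fun _ => PySem.List.pyRange 0 (per + 1) 1)) → 0 ≤ t.sum := by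
  intro ws
  induction ws with
  | nil => intro t ht; simp [pvProduct] at ht; simp [ht]
  | cons w ws ih =>
      intro t ht
      simp only [List.map_cons, pvProduct, List.mem_flatMap, List.mem_map] at ht
      obtain ⟨c, hc, t', ht', rfl⟩ := ht
      have hc' := (PySem.List.mem_pyRange_one.mp hc).1
      have := ih t' ht'
      simp only [List.sum_cons]; omega

theorem pvAddMap_eq (widths t : List Int) :
    pvAddMap widths t =
      (PySem.Dict.ofList ((widths.zip t).filter (fun p => decide (0 < p.2)))).items := by
  unfold pvAddMap
  have key : ∀ (pairs : List (Int × Int)) (d : PySem.Dict Int Int),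
      pairs.foldl (fun d (p : Int × Int) => if 0 < p.2 then d.insert p.1 p.2 else d) d =
      (pairs.filter (fun p => decide (0 < p.2))).foldl (fun d (p : Int × Int) => d.insert p.1 p.2) d := by
    intro pairs
    induction pairs with
    | nil => intro d; rfl
    | cons p ps ih =>
        intro d
        by_cases hp : 0 < p.2 <;> simp [hp, ih]
  rw [key]
  rfl

theorem pvDfs_eq_pvSpec (per tot : Int) :
    ∀ (ws : List Int) (budget : Int) (acc : List (Int × Int)),
      (budget = tot ∨ 0 ≤ budget) →
      pvDfs per tot ws budget acc = pvSpec per tot ws budget acc := by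
  intro ws
  induction ws with
  | nil =>
      intro budget acc hb
      simp only [pvDfs, pvSpec, List.map_nil, pvProduct]
      by_cases h : budget < tot
      · have h0 : (0 : Int) ≤ budget := by rcases hb with rfl | hb <;> omega
        simp [h, h0]
      · simp [h]
  | cons w ws ih =>
      intro budget acc hb
      -- G c : the slice of the spec for a fixed first coordinate c
      set rest := pvProduct (ws.map (fun _ => PySem.List.pyRange 0 (per + 1) 1)) with hrest
      set G := fun (c : Int) =>
        ((rest.filter (fun t' => decide (c + t'.sum ≤ budget ∧ budget - (c + t'.sum) < tot))).map
          (fun t' => (PySem.Dict.ofList (acc ++ (((w, c) :: ws.zip t').filter (fun p => decide (0 < p.2))))).items)) with hG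
      have spec_eq : pvSpec per tot (w :: ws) budget acc =
          (PySem.List.pyRange 0 (per + 1) 1).flatMap G := by
        simp only [pvSpec, List.map_cons, pvProduct, ← hrest]
        rw [List.filter_flatMap, List.map_flatMap]
        refine List.flatMap_congr (fun c _ => ?_)
        rw [List.filter_map, List.map_map, hG]
        beta_reduce
        simp only [Function.comp_def, List.sum_cons, List.zip_cons_cons]
        rfl
      have Gnil : ∀ c : Int, budget < c → G c = [] := by
        intro c hc
        rw [hG]
        beta_reduce
        have hnil : (rest.filter (fun t' => decide (c + t'.sum ≤ budget ∧ budget - (c + t'.sum) < tot))) = [] := by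
          rw [List.filter_eq_nil_iff]
          intro t' ht'
          have hs := pvProduct_sum_nonneg per ws t' (by rwa [hrest] at ht')
          simp only [decide_eq_true_eq, not_and]
          intro h1
          omega
        rw [hnil]
        rfl
      have Geq : ∀ c : Int, 0 ≤ c → c ≤ budget →
          G c = (if c = 0 then pvDfs per tot ws budget acc
                 else pvDfs per tot ws (budget - c) (acc ++ [(w, c)])) := by
        intro c hc0 hcb
        by_cases hc : c = 0
        · subst hc
          rw [if_pos rfl, ih budget acc hb, hG, pvSpec, ← hrest]
          beta_reduce
          have hf : (rest.filter (fun t' => decide (0 + t'.sum ≤ budget ∧ budget - (0 + t'.sum) < tot)))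
              = rest.filter (fun t => decide (t.sum ≤ budget ∧ budget - t.sum < tot)) :=
            List.filter_congr (fun t' _ => by simp only [decide_eq_decide]; omega)
          rw [hf]
          refine List.map_congr_left (fun t' _ => ?_)
          simp
        · have hcpos : (0:Int) < c := lt_of_le_of_ne hc0 (fun h => hc h.symm)
          rw [if_neg hc, ih (budget - c) (acc ++ [(w, c)]) (Or.inr (by omega)), hG, pvSpec, ← hrest]
          beta_reduce
          have hf : (rest.filter (fun t' => decide (c + t'.sum ≤ budget ∧ budget - (c + t'.sum) < tot)))
              = rest.filter (fun t => decide (t.sum ≤ budget - c ∧ budget - c - t.sum < tot)) :=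
            List.filter_congr (fun t' _ => by simp only [decide_eq_decide]; omega)
          rw [hf]
          refine List.map_congr_left (fun t' _ => ?_)
          simp [hcpos, List.append_assoc]
      rw [spec_eq, pvDfs]
      by_cases hbneg : budget < 0
      · have hbt : budget = tot := by
          rcases hb with rfl | hb
          · rfl
          · omega
        have hmin : min per budget + 1 ≤ 0 := by omega
        rw [PySem.List.pyRange_one_eq_nil hmin, List.flatMap_nil]
        symm
        rw [List.flatMap_eq_nil_iff]
        intro c hc
        have := (PySem.List.mem_pyRange_one.mp hc).1
        exact Gnil c (by omega)
      · by_cases hpb : per ≤ budget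
        · have hmin : min per budget = per := by omega
          rw [hmin]
          refine List.flatMap_congr (fun c hc => ?_)
          have hm := PySem.List.mem_pyRange_one.mp hc
          exact (Geq c hm.1 (by omega)).symm
        · have hmin : min per budget = budget := by omega
          rw [hmin]
          rw [PySem.List.pyRange_one_append 0 (budget + 1) (per + 1) (by omega) (by omega),
            List.flatMap_append]
          have h2 : (PySem.List.pyRange (budget + 1) (per + 1) 1).flatMap G = [] := by
            rw [List.flatMap_eq_nil_iff]
            intro c hc
            have := (PySem.List.mem_pyRange_one.mp hc).1
            exact Gnil c (by omega)
          rw [h2, List.append_nil]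
          refine List.flatMap_congr (fun c hc => ?_)
          have hm := PySem.List.mem_pyRange_one.mp hc
          exact (Geq c hm.1 (by omega)).symm

-- ===== VERDICT (by name: the statement is the Claim_ definition above) =====
theorem generate_addition_candidates_spec : Claim_equal_generate_addition_candidates := by
  unfold Claim_equal_generate_addition_candidates
  intro widths per tot _
  unfold Spec_generate_addition_candidates generate_addition_candidates generate_addition_candidates_alt
  rw [PySem.List.foldl_append_ite (fun t : List Int => 0 < t.sum ∧ t.sum ≤ tot) (pvAddMap widths)]
  rw [pvDfs_eq_pvSpec per tot widths tot [] (Or.inl rfl), pvSpec]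
  rw [List.nil_append]
  congr 1
  · funext t
    rw [pvAddMap_eq, List.nil_append]
  · exact List.filter_congr (fun t _ => by simp only [decide_eq_decide]; omega)
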